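-- pv_equiv track=rewrite | github.com/Fondamenti18/fondamenti-di-programmazione | students/1793611/homework04/program01.py | treefromx
-- ===== SOURCE A (Python) =====
-- def treefromx(x, dic, rdtree):
-- 	if x not in dic.keys():
-- 		return rdtree
-- 	else:
-- 		rdtree[x]=dic[x]
-- 		for l in dic[x]:
-- 			rdtree=treefromx(l, dic, rdtree)
-- 	return rdtree
-- ===== SOURCE B (Python) =====
-- def treefromx(x, dic, rdtree):
--     # Stage 1: iterative stack DFS recording the visit order (no visited set,
--     # so revisits / infinite loops on cycles behave exactly as the recursion).
--     stack = [x]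
--     order = []
--     while stack:
--         n = stack.pop()
--         if n in dic:
--             order.append(n)
--             stack.extend(reversed(dic[n]))
--     # Stage 2: replay the recorded writes on the passed-in rdtree.
--     for n in order:
--         rdtree[n] = dic[n]
--     return rdtree
-- ===== Notes on version B (the rewrite author's own statement) =====
-- stated objective: alternative
-- what changed: A's recursion that mutates rdtree while descending is replaced by two staged passes: an explicit-stack iterative DFS that only records the preorder visit sequence, then a separate loop that writes rdtree[n]=dic[n] for that sequence; no visited set, so revisits and divergence on cycles match A.
import Mathlib
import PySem

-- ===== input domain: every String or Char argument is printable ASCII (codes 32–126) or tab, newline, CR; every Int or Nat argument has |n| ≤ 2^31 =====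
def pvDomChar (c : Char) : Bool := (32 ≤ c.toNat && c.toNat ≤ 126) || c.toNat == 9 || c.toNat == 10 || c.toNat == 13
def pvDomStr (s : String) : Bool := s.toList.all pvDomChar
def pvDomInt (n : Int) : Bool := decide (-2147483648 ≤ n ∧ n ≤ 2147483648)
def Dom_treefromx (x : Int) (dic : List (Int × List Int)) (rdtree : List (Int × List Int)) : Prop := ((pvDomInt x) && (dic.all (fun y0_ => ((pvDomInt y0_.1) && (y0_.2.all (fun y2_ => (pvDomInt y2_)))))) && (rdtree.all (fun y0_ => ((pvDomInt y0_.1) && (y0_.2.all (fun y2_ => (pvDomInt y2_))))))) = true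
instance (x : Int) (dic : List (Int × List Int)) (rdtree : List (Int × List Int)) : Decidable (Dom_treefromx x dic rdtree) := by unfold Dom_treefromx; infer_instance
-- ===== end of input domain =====

-- B replaces A's mutate-while-recursing descent by two staged passes: an explicit-stack iterative
-- DFS that only records the visit order, then a second loop replaying rdtree[n]=dic[n] over that
-- order.  No visited set, so revisits/divergence on cycles match A; both Pythons mutate the
-- passed-in rdtree in place and return it.  Both Pythons diverge on cyclic reachable input; the
-- Lean ports carry a fuel parameter that Pre_treefromx (acyclicity of the part of dic reachable
-- from x = exactly where the Pythons return) proves sufficient.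

-- ===== PORT A =====
-- A's recursion, fuelled (none = the fuel ran out; Pre_ shows the fuel used below never runs out).
def pvRecA (dic : PySem.Dict Int (List Int)) : Nat → Int → PySem.Dict Int (List Int) → Option (PySem.Dict Int (List Int))
  | 0, _, _ => none
  | f + 1, x, r =>
    match dic.get? x with
    | none => some r                                   -- if x not in dic.keys(): return rdtree
    | some ch =>                                       -- rdtree[x] = dic[x]; for l in dic[x]: rdtree = treefromx(l, dic, rdtree)
      List.foldlM (fun acc l => pvRecA dic f l acc) (r.insert x ch) ch
  termination_by f => f

-- fuel for A: recursion depth is bounded by (#distinct keys)+1 on every input satisfying Pre_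
def pvFA (dic : List (Int × List Int)) : Nat := (dic.map Prod.fst).toFinset.card + 1

def treefromx (x : Int) (dic : List (Int × List Int)) (rdtree : List (Int × List Int)) : List (Int × List Int) :=
  ((pvRecA (PySem.Dict.mk dic) (pvFA dic) x (PySem.Dict.mk rdtree)).getD (PySem.Dict.mk rdtree)).items

-- ===== PORT B =====
-- Stage 1 of B: the while-loop over the explicit stack, fuelled (one fuel per iteration), building
-- the ordered list `acc` of visited keys.  Python keeps the stack top at the END of the list and
-- pushes reversed(dic[n]); the port keeps the top at the HEAD, so that push becomes ch ++ s.
def pvOrderB (dic : PySem.Dict Int (List Int)) : Nat → List Int → List Int → Option (List Int)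
  | _, [], acc => some acc                             -- while stack: …  (loop done → the order list)
  | 0, _ :: _, _ => none
  | g + 1, n :: s, acc =>
    match dic.get? n with
    | none => pvOrderB dic g s acc                     -- n not in dic: nothing recorded
    | some ch => pvOrderB dic g (ch ++ s) (acc ++ [n]) -- order.append(n); stack.extend(reversed(dic[n]))
  termination_by g => g

-- fuel for B's loop: iterations ≤ C^(depth bound), C = 1 + total number of child slots in dic
def pvCB (dic : List (Int × List Int)) : Nat := 1 + (dic.map (fun p => p.2.length)).sum
def pvFB (dic : List (Int × List Int)) : Nat := pvCB dic ^ pvFA dic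

-- Stage 2 of B: for n in order: rdtree[n] = dic[n]  (a plain fold of inserts over the order list)
def treefromx_alt (x : Int) (dic : List (Int × List Int)) (rdtree : List (Int × List Int)) : List (Int × List Int) :=
  (((pvOrderB (PySem.Dict.mk dic) (pvFB dic) [x] []).getD []).foldl
      (fun r n => r.insert n (((PySem.Dict.mk dic).get? n).getD [])) (PySem.Dict.mk rdtree)).items

-- ===== PRECONDITION & SPEC =====
-- reachability closure: iterate "add all children of members" enough times to reach the fixpoint
def pvStepF (dic : PySem.Dict Int (List Int)) (S : Finset Int) : Finset Int :=
  S ∪ S.biUnion (fun n => ((dic.get? n).getD []).toFinset)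
def pvUniv (dic : PySem.Dict Int (List Int)) (S0 : Finset Int) : Finset Int :=
  S0 ∪ (dic.items.flatMap (fun p => p.2)).toFinset
def pvReach (dic : PySem.Dict Int (List Int)) (S0 : Finset Int) : Finset Int :=
  (pvStepF dic)^[(pvUniv dic S0).card] S0

-- Pre_: exactly the inputs on which the Python A returns — no node reachable from x lies on a dic-cycle
-- (on a reachable cycle both Pythons recurse/loop forever).
def Pre_treefromx (x : Int) (dic : List (Int × List Int)) (rdtree : List (Int × List Int)) : Prop :=
  ∀ n ∈ pvReach (PySem.Dict.mk dic) {x},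
    n ∉ pvReach (PySem.Dict.mk dic) (((PySem.Dict.mk dic).get? n).getD []).toFinset
instance (x : Int) (dic : List (Int × List Int)) (rdtree : List (Int × List Int)) : Decidable (Pre_treefromx x dic rdtree) := by unfold Pre_treefromx; infer_instance

def pvWitness_treefromx : Int × (List (Int × List Int)) × (List (Int × List Int)) :=
  (1, [(1, [2, 3]), (2, [])], [])

def Spec_treefromx (x : Int) (dic : List (Int × List Int)) (rdtree : List (Int × List Int)) (out : List (Int × List Int)) : Prop := out = treefromx_alt x dic rdtree
instance (x : Int) (dic : List (Int × List Int)) (rdtree : List (Int × List Int)) (out : List (Int × List Int)) : Decidable (Spec_treefromx x dic rdtree out) := by unfold Spec_treefromx; infer_instance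

-- ===== CLAIM (what is proved, stated in full; the proofs are below) =====
def Claim_equal_treefromx : Prop := ∀ (x : Int) (dic : List (Int × List Int)) (rdtree : List (Int × List Int)), Dom_treefromx x dic rdtree → Pre_treefromx x dic rdtree → Spec_treefromx x dic rdtree (treefromx x dic rdtree)

-- ===== LEMMAS AND PROOFS =====
-- proof-only intermediate: B's stage-1 loop fused with the stage-2 inserts (used only to relate
-- A's recursion to B's two stages; neither port is defined from it)
def pvLoopB (dic : PySem.Dict Int (List Int)) : Nat → List Int → PySem.Dict Int (List Int) → Option (PySem.Dict Int (List Int))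
  | _, [], r => some r
  | 0, _ :: _, _ => none
  | g + 1, n :: s, r =>
    match dic.get? n with
    | none => pvLoopB dic g s r
    | some ch => pvLoopB dic g (ch ++ s) (r.insert n ch)
  termination_by g => g

def pvEdge (dic : PySem.Dict Int (List Int)) (a b : Int) : Prop :=
  ∃ ch, dic.get? a = some ch ∧ b ∈ ch

theorem pvRecA_zero (dic : PySem.Dict Int (List Int)) (x : Int) (r : PySem.Dict Int (List Int)) :
    pvRecA dic 0 x r = none := by rw [pvRecA]

theorem pvRecA_succ (dic : PySem.Dict Int (List Int)) (f : Nat) (x : Int) (r : PySem.Dict Int (List Int)) :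
    pvRecA dic (f + 1) x r =
      match dic.get? x with
      | none => some r
      | some ch => List.foldlM (fun acc l => pvRecA dic f l acc) (r.insert x ch) ch := by
  rw [pvRecA]

theorem pvLoopB_nil (dic : PySem.Dict Int (List Int)) (g : Nat) (r : PySem.Dict Int (List Int)) :
    pvLoopB dic g [] r = some r := by rw [pvLoopB]

theorem pvLoopB_zero (dic : PySem.Dict Int (List Int)) (n : Int) (s : List Int) (r : PySem.Dict Int (List Int)) :
    pvLoopB dic 0 (n :: s) r = none := by rw [pvLoopB]

theorem pvLoopB_succ (dic : PySem.Dict Int (List Int)) (g : Nat) (n : Int) (s : List Int) (r : PySem.Dict Int (List Int)) :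
    pvLoopB dic (g + 1) (n :: s) r =
      match dic.get? n with
      | none => pvLoopB dic g s r
      | some ch => pvLoopB dic g (ch ++ s) (r.insert n ch) := by
  rw [pvLoopB]

theorem pvOrderB_nil (dic : PySem.Dict Int (List Int)) (g : Nat) (acc : List Int) :
    pvOrderB dic g [] acc = some acc := by rw [pvOrderB]

theorem pvOrderB_succ (dic : PySem.Dict Int (List Int)) (g : Nat) (n : Int) (s acc : List Int) :
    pvOrderB dic (g + 1) (n :: s) acc =
      match dic.get? n with
      | none => pvOrderB dic g s acc
      | some ch => pvOrderB dic g (ch ++ s) (acc ++ [n]) := by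
  rw [pvOrderB]

-- the fused loop = stage-1 order + stage-2 fold of inserts
theorem pv_loop_order (dic : PySem.Dict Int (List Int)) :
    ∀ (g : Nat) (s : List Int) (r v : PySem.Dict Int (List Int)) (acc : List Int),
      pvLoopB dic g s r = some v →
      ∃ os, pvOrderB dic g s acc = some (acc ++ os) ∧
        os.foldl (fun r n => r.insert n ((dic.get? n).getD [])) r = v := by
  intro g
  induction g with
  | zero =>
    intro s r v acc h
    cases s with
    | nil =>
      rw [pvLoopB_nil] at h
      exact ⟨[], by simp [pvOrderB_nil], by simpa using Option.some.inj h⟩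
    | cons n t => rw [pvLoopB_zero] at h; exact absurd h (by simp)
  | succ g ih =>
    intro s r v acc h
    cases s with
    | nil =>
      rw [pvLoopB_nil] at h
      exact ⟨[], by simp [pvOrderB_nil], by simpa using Option.some.inj h⟩
    | cons n t =>
      rcases hget : dic.get? n with _ | ch
      · rw [pvLoopB_succ, hget] at h
        rcases ih t r v acc h with ⟨os, ho, hf⟩
        exact ⟨os, by rw [pvOrderB_succ, hget]; simpa using ho, hf⟩
      · rw [pvLoopB_succ, hget] at h
        rcases ih (ch ++ t) (r.insert n ch) v (acc ++ [n]) h with ⟨os, ho, hf⟩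
        refine ⟨n :: os, ?_, ?_⟩
        · rw [pvOrderB_succ, hget]
          simp only []
          rw [ho]
          simp
        · simp only [List.foldl_cons, hget, Option.getD_some]
          exact hf

theorem pvWitness_ok : Pre_treefromx pvWitness_treefromx.1 pvWitness_treefromx.2.1 pvWitness_treefromx.2.2 := by decide

theorem pv_subset_step (dic : PySem.Dict Int (List Int)) (S : Finset Int) : S ⊆ pvStepF dic S :=
  Finset.subset_union_left

theorem pv_subset_iter (dic : PySem.Dict Int (List Int)) (k : Nat) (S : Finset Int) :
    S ⊆ (pvStepF dic)^[k] S := by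
  induction k with
  | zero => simp
  | succ k ih =>
    rw [Function.iterate_succ_apply']
    exact ih.trans (pv_subset_step dic _)

theorem pv_iter_mono_succ (dic : PySem.Dict Int (List Int)) (k : Nat) (S : Finset Int) :
    (pvStepF dic)^[k] S ⊆ (pvStepF dic)^[k + 1] S := by
  rw [Function.iterate_succ_apply']
  exact pv_subset_step dic _

theorem pv_iter_subset_univ (dic : PySem.Dict Int (List Int)) (S0 : Finset Int) (k : Nat) :
    (pvStepF dic)^[k] S0 ⊆ pvUniv dic S0 := by
  induction k with
  | zero =>
    simp only [Function.iterate_zero, id_eq]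
    unfold pvUniv
    exact Finset.subset_union_left
  | succ k ih =>
    rw [Function.iterate_succ_apply']
    intro a ha
    rcases Finset.mem_union.1 ha with h | h
    · exact ih h
    · rcases Finset.mem_biUnion.1 h with ⟨n, _, hc⟩
      rcases hget : dic.get? n with _ | ch
      · rw [hget] at hc; simp at hc
      · rw [hget] at hc
        simp only [Option.getD_some, List.mem_toFinset] at hc
        have hmem : (n, ch) ∈ dic.items := PySem.Dict.mem_items_of_get?_eq_some _ hget
        refine Finset.mem_union_right _ ?_
        rw [List.mem_toFinset, List.mem_flatMap]
        exact ⟨(n, ch), hmem, hc⟩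

theorem pv_reach_fixed (dic : PySem.Dict Int (List Int)) (S0 : Finset Int) :
    pvStepF dic (pvReach dic S0) = pvReach dic S0 := by
  set f := pvStepF dic with hf
  set N := (pvUniv dic S0).card with hN
  have hgrow : ∀ k : Nat, (∃ j < k, f (f^[j] S0) = f^[j] S0) ∨ k ≤ (f^[k] S0).card := by
    intro k
    induction k with
    | zero => exact Or.inr (Nat.zero_le _)
    | succ k ih =>
      rcases ih with ⟨j, hj, hfix⟩ | hcard
      · exact Or.inl ⟨j, Nat.lt_succ_of_lt hj, hfix⟩
      · by_cases hfix : f (f^[k] S0) = f^[k] S0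
        · exact Or.inl ⟨k, Nat.lt_succ_self k, by simpa using hfix⟩
        · right
          have hss : f^[k] S0 ⊂ f^[k + 1] S0 := by
            refine Finset.ssubset_iff_subset_ne.2 ⟨pv_iter_mono_succ dic k S0, ?_⟩
            rw [Function.iterate_succ_apply']
            exact fun h => hfix h.symm
          have := Finset.card_lt_card hss
          omega
  have hexists : ∃ j ≤ N, f (f^[j] S0) = f^[j] S0 := by
    rcases hgrow (N + 1) with ⟨j, hj, hfix⟩ | hcard
    · exact ⟨j, Nat.lt_succ_iff.1 hj, hfix⟩
    · have h2 := Finset.card_le_card (pv_iter_subset_univ dic S0 (N + 1))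
      rw [← hf, ← hN] at h2
      omega
  rcases hexists with ⟨j, hjN, hfix⟩
  have hstable : ∀ m, j ≤ m → f^[m] S0 = f^[j] S0 := by
    intro m hm
    induction m with
    | zero => cases Nat.le_zero.1 hm; rfl
    | succ m ih =>
      rcases Nat.lt_or_ge j (m + 1) with hlt | hge
      · have hjm : j ≤ m := Nat.lt_succ_iff.1 hlt
        rw [Function.iterate_succ_apply', ih hjm, hfix]
      · have : j = m + 1 := Nat.le_antisymm hm hge
        rw [this]
  have h1 : f^[N] S0 = f^[j] S0 := hstable N hjN
  show f (f^[N] S0) = f^[N] S0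
  rw [h1, hfix]

theorem pv_reach_closed (dic : PySem.Dict Int (List Int)) (S0 : Finset Int) {b c : Int}
    (hb : b ∈ pvReach dic S0) (he : pvEdge dic b c) : c ∈ pvReach dic S0 := by
  rcases he with ⟨ch, hget, hc⟩
  have : c ∈ pvStepF dic (pvReach dic S0) := by
    refine Finset.mem_union_right _ (Finset.mem_biUnion.2 ⟨b, hb, ?_⟩)
    rw [hget]
    simpa using hc
  rwa [pv_reach_fixed] at this

theorem pv_star_mem (dic : PySem.Dict Int (List Int)) (S0 : Finset Int) {a b : Int}
    (ha : a ∈ S0) (hstar : Relation.ReflTransGen (pvEdge dic) a b) : b ∈ pvReach dic S0 := by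
  induction hstar with
  | refl => exact pv_subset_iter dic _ S0 ha
  | tail _ he ih => exact pv_reach_closed dic S0 ih he

theorem pv_fold_term (dic : PySem.Dict Int (List Int)) (f : Nat)
    (cs : List Int) (hall : ∀ c ∈ cs, ∀ r : PySem.Dict Int (List Int), ∃ r', pvRecA dic f c r = some r') :
    ∀ r, ∃ r', List.foldlM (fun acc l => pvRecA dic f l acc) r cs = some r' := by
  induction cs with
  | nil => intro r; exact ⟨r, rfl⟩
  | cons c cs ih =>
    intro r
    rcases hall c (by simp) r with ⟨r2, h2⟩
    rcases ih (fun c' hc' => hall c' (by simp [hc'])) r2 with ⟨r', h'⟩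
    exact ⟨r', by simp [List.foldlM_cons, h2, h']⟩

theorem pv_recA_term (dic : PySem.Dict Int (List Int)) (x : Int)
    (hpre : ∀ n ∈ pvReach dic {x}, n ∉ pvReach dic ((dic.get? n).getD []).toFinset) :
    ∀ (fresh : Finset Int) (n : Int),
      (∀ k, (dic.get? k).isSome → Relation.ReflTransGen (pvEdge dic) n k → k ∈ fresh) →
      Relation.ReflTransGen (pvEdge dic) x n →
      ∀ r, ∃ r', pvRecA dic (fresh.card + 1) n r = some r' := by
  intro fresh
  induction fresh using Finset.strongInduction with
  | _ fresh IH =>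
    intro n hcov hstar r
    rcases hget : dic.get? n with _ | ch
    · exact ⟨r, by rw [pvRecA_succ, hget]⟩
    · have hkey : (dic.get? n).isSome := by simp [hget]
      have hn : n ∈ fresh := hcov n hkey Relation.ReflTransGen.refl
      have hcard : (fresh.erase n).card + 1 = fresh.card := Finset.card_erase_add_one hn
      have hchild : ∀ c ∈ ch, ∀ r0 : PySem.Dict Int (List Int),
          ∃ r', pvRecA dic ((fresh.erase n).card + 1) c r0 = some r' := by
        intro c hc r0
        have hedge : pvEdge dic n c := ⟨ch, hget, hc⟩
        have hstarc : Relation.ReflTransGen (pvEdge dic) x c := hstar.tail hedge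
        refine IH (fresh.erase n) (Finset.erase_ssubset hn) c ?_ hstarc r0
        intro k hk hkstar
        have hkfresh : k ∈ fresh := hcov k hk (Relation.ReflTransGen.head hedge hkstar)
        have hkn : k ≠ n := by
          intro heq
          subst heq
          have hxk : k ∈ pvReach dic {x} := pv_star_mem dic {x} (by simp) hstar
          have : k ∈ pvReach dic ((dic.get? k).getD []).toFinset := by
            refine pv_star_mem dic _ ?_ hkstar
            rw [hget]
            simpa using hc
          exact hpre k hxk this
        exact Finset.mem_erase.2 ⟨hkn, hkfresh⟩
      rcases pv_fold_term dic ((fresh.erase n).card + 1) ch hchild (r.insert n ch) with ⟨r', hfold⟩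
      refine ⟨r', ?_⟩
      have heq : fresh.card + 1 = ((fresh.erase n).card + 1) + 1 := by omega
      rw [heq, pvRecA_succ, hget]
      exact hfold

theorem pv_loopB_mono (dic : PySem.Dict Int (List Int)) :
    ∀ (g g' : Nat), g ≤ g' → ∀ (s : List Int) (r v : PySem.Dict Int (List Int)),
      pvLoopB dic g s r = some v → pvLoopB dic g' s r = some v := by
  intro g
  induction g with
  | zero =>
    intro g' _ s r v h
    cases s with
    | nil => rw [pvLoopB_nil] at h ⊢; exact h
    | cons n t => rw [pvLoopB_zero] at h; exact absurd h (by simp)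
  | succ g ih =>
    intro g' hle s r v h
    cases s with
    | nil => rw [pvLoopB_nil] at h ⊢; exact h
    | cons n t =>
      obtain ⟨g'', rfl⟩ : ∃ g'', g' = g'' + 1 := ⟨g' - 1, by omega⟩
      have hg : g ≤ g'' := by omega
      rcases hget : dic.get? n with _ | ch
      · simp only [pvLoopB_succ, hget] at h ⊢
        exact ih g'' hg t r v h
      · simp only [pvLoopB_succ, hget] at h ⊢
        exact ih g'' hg (ch ++ t) (r.insert n ch) v h

theorem pv_sim (dic : PySem.Dict Int (List Int)) (C : Nat) (hC1 : 1 ≤ C)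
    (hC : ∀ n ch, dic.get? n = some ch → ch.length + 1 ≤ C) :
    ∀ (f : Nat) (n : Int) (r r' : PySem.Dict Int (List Int)),
      pvRecA dic f n r = some r' →
      ∀ (g : Nat) (s : List Int) (r'' : PySem.Dict Int (List Int)),
        pvLoopB dic g s r' = some r'' →
        pvLoopB dic (C ^ f + g) (n :: s) r = some r'' := by
  intro f
  induction f with
  | zero => intro n r r' h; rw [pvRecA_zero] at h; exact absurd h (by simp)
  | succ f ihf =>
    intro n r r' h g s r'' hloop
    have hpow1 : 1 ≤ C ^ (f + 1) := Nat.one_le_pow _ _ (by omega)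
    obtain ⟨m, hm⟩ : ∃ m, C ^ (f + 1) + g = m + 1 := ⟨C ^ (f + 1) + g - 1, by omega⟩
    rcases hget : dic.get? n with _ | ch
    · rw [pvRecA_succ, hget] at h
      have hr : r' = r := by simpa using h.symm
      rw [hr] at hloop
      rw [hm]
      simp only [pvLoopB_succ, hget]
      exact pv_loopB_mono dic g m (by omega) s r r'' hloop
    · have hfold : List.foldlM (fun acc l => pvRecA dic f l acc) (r.insert n ch) ch = some r' := by
        rw [pvRecA_succ, hget] at h; exact h
      have M : ∀ (cs : List Int) (r1 : PySem.Dict Int (List Int)),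
          List.foldlM (fun acc l => pvRecA dic f l acc) r1 cs = some r' →
          pvLoopB dic (cs.length * C ^ f + g) (cs ++ s) r1 = some r'' := by
        intro cs
        induction cs with
        | nil =>
          intro r1 hr1
          rw [List.foldlM_nil] at hr1
          obtain rfl : r1 = r' := Option.some.inj hr1
          simp only [List.length_nil, Nat.zero_mul, Nat.zero_add, List.nil_append]
          exact hloop
        | cons c cs ihcs =>
          intro r1 hr1
          rcases h2 : pvRecA dic f c r1 with _ | r2
          · rw [List.foldlM_cons, h2] at hr1; simp at hr1
          · rw [List.foldlM_cons, h2] at hr1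
            have hrest : List.foldlM (fun acc l => pvRecA dic f l acc) r2 cs = some r' := hr1
            have htail := ihcs r2 hrest
            have hstep := ihf c r1 r2 h2 (cs.length * C ^ f + g) (cs ++ s) r'' htail
            have harith : (c :: cs).length * C ^ f + g = C ^ f + (cs.length * C ^ f + g) := by
              simp only [List.length_cons]; ring
            rw [harith]
            exact hstep
      have hlen : ch.length + 1 ≤ C := hC n ch hget
      have hfuel : ch.length * C ^ f + g ≤ m := by
        have hpowf : 1 ≤ C ^ f := Nat.one_le_pow _ _ (by omega)
        have h1 : ch.length * C ^ f + C ^ f ≤ C * C ^ f := by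
          have := Nat.mul_le_mul_right (C ^ f) hlen
          calc ch.length * C ^ f + C ^ f = (ch.length + 1) * C ^ f := by ring
            _ ≤ C * C ^ f := this
        have h2 : C * C ^ f = C ^ (f + 1) := by ring
        omega
      rw [hm]
      simp only [pvLoopB_succ, hget]
      exact pv_loopB_mono dic (ch.length * C ^ f + g) m hfuel (ch ++ s) (r.insert n ch) r'' (M ch (r.insert n ch) hfold)

-- ===== VERDICT (by name: the statement is the Claim_ definition above) =====
theorem treefromx_spec : Claim_equal_treefromx := by
  intro x dic rdtree _hdom hpre
  unfold Spec_treefromx treefromx treefromx_alt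
  set D := PySem.Dict.mk dic with hD
  have hC : ∀ n ch, D.get? n = some ch → ch.length + 1 ≤ pvCB dic := by
    intro n ch hget
    have hmem : (n, ch) ∈ D.items := PySem.Dict.mem_items_of_get?_eq_some _ hget
    have : ch.length ∈ dic.map (fun p => p.2.length) := by
      exact List.mem_map.2 ⟨(n, ch), hmem, rfl⟩
    have := List.single_le_sum (by intro y _; exact Nat.zero_le y) _ this
    unfold pvCB
    omega
  have hcov : ∀ k, (D.get? k).isSome → Relation.ReflTransGen (pvEdge D) x k →
      k ∈ (dic.map Prod.fst).toFinset := by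
    intro k hk _
    rcases Option.isSome_iff_exists.1 hk with ⟨ch, hch⟩
    have hmem : (k, ch) ∈ D.items := PySem.Dict.mem_items_of_get?_eq_some _ hch
    rw [List.mem_toFinset]
    exact List.mem_map.2 ⟨(k, ch), hmem, rfl⟩
  rcases pv_recA_term D x hpre ((dic.map Prod.fst).toFinset) x hcov
      Relation.ReflTransGen.refl (PySem.Dict.mk rdtree) with ⟨r', hA⟩
  have hA' : pvRecA D (pvFA dic) x (PySem.Dict.mk rdtree) = some r' := hA
  have hB : pvLoopB D (pvCB dic ^ pvFA dic + 0) [x] (PySem.Dict.mk rdtree) = some r' :=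
    pv_sim D (pvCB dic) (by unfold pvCB; omega) hC (pvFA dic) x (PySem.Dict.mk rdtree) r' hA' 0 [] r' (pvLoopB_nil D 0 r')
  rw [Nat.add_zero] at hB
  rcases pv_loop_order D (pvFB dic) [x] (PySem.Dict.mk rdtree) r' [] (by unfold pvFB; exact hB) with ⟨os, ho, hf⟩
  rw [hA', ho]
  simp only [Option.getD_some, List.nil_append]
  rw [hf]
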